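-- pv_equiv track=rewrite | github.com/srishtisrivastava3103/Leetcode-Problems | Other Problems/maximize_sum_by_deleting_elements.py | maximize_sum
-- ===== SOURCE A (Python) =====
-- def maximize_sum(array):
--     freq = [0]*(max(array)+1)
--     for num in array:
--         freq[num]+=1
--     maxSum = [freq[0]*0, freq[1]*1]
--     for idx in range(2,len(freq)):
--         maxSum.append(max(maxSum[idx-2]+freq[idx]*idx,maxSum[idx-1]))
--     return maxSum[-1]
-- ===== SOURCE B (Python) =====
-- def maximize_sum(array):
--     counts = {}
--     for x in array:
--         counts[x] = counts.get(x, 0) + 1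
--     take, skip, prev = 0, 0, None
--     for v in sorted(counts):
--         best = take if take > skip else skip
--         if prev is not None and v == prev + 1:
--             take, skip = skip + v * counts[v], best
--         else:
--             take, skip = best + v * counts[v], best
--         prev = v
--     return take if take > skip else skip
-- ===== Notes on version B (the rewrite author's own statement) =====
-- stated objective: alternative
-- what changed: B replaces A's dense frequency array of size max(array)+1 and the growing house-robber DP list over every value 0..max by a hash counter plus the same DP over the sorted distinct values only, with O(1) state; Pre_ restricts to the natural delete-and-earn domain (nonempty, nonnegative, max >= 1): outside it A raises or miscounts via negative-index wraparound.
-- outside the precondition, e.g. on maximize_sum([-1, 2]): A returns 4, B returns 2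
import Mathlib
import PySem

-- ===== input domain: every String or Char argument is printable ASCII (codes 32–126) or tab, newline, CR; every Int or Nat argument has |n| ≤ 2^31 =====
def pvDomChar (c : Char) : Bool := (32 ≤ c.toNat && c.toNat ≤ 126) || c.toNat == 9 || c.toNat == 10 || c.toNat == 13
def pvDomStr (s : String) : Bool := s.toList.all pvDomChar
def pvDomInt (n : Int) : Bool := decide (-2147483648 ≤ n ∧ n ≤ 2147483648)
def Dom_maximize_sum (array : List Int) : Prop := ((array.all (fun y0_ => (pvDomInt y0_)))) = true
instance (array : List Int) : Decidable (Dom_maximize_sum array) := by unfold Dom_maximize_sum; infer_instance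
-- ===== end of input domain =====

-- B groups by value into a counter and runs the delete-and-earn DP over the sorted distinct
-- values only, instead of A's dense frequency array and DP list over every value 0..max(array).


-- ===== PORT A =====
def maximize_sum (array : List Int) : Int :=
  match PySem.List.max? array (fun x => x) with
  | none => 0   -- Python: max([]) raises ValueError (excluded by Pre_)
  | some m =>
    let n := (m + 1).toNat
    -- freq = [0]*(max(array)+1); for num in array: freq[num] += 1
    let freq := array.foldl
      (fun f num => f.set num.toNat (f.getD num.toNat 0 + 1))
      (List.replicate n (0 : Int))
    -- maxSum = [freq[0]*0, freq[1]*1]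
    let maxSum : List Int := [freq.getD 0 0 * 0, freq.getD 1 0 * 1]
    -- for idx in range(2, len(freq)): maxSum.append(max(maxSum[idx-2]+freq[idx]*idx, maxSum[idx-1]))
    let maxSum := (List.range' 2 (n - 2)).foldl
      (fun ms idx =>
        ms ++ [max (ms.getD (idx - 2) 0 + freq.getD idx 0 * (idx : Int)) (ms.getD (idx - 1) 0)])
      maxSum
    -- return maxSum[-1]
    maxSum.getLastD 0

-- ===== PORT B =====
def maximize_sum_alt (array : List Int) : Int :=
  -- counts = {}; for x in array: counts[x] = counts.get(x, 0) + 1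
  let counts : PySem.Dict Int Int :=
    array.foldl (fun d x => d.insert x (d.getD x 0 + 1)) PySem.Dict.empty
  -- take, skip, prev = 0, 0, None; for v in sorted(counts): …
  let st := (PySem.List.sorted counts.keys (fun v => v) false).foldl
    (fun (st : Int × Int × Option Int) v =>
      let take := st.1
      let skip := st.2.1
      let prev := st.2.2
      let best := if take > skip then take else skip
      if prev = some (v - 1) then (skip + v * counts.getD v 0, best, some v)
      else (best + v * counts.getD v 0, best, some v))
    (0, 0, none)
  -- return take if take > skip else skip
  if st.1 > st.2.1 then st.1 else st.2.1

-- ===== PRECONDITION & SPEC =====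
-- Pre_ restricts to the natural domain of delete-and-earn: a nonempty array of nonnegative
-- integers whose maximum is at least 1.  Outside it A raises (ValueError on [], IndexError when
-- max(array) < 1 or an element is below -(max+1)) or, for negative elements with magnitude at
-- most max+1, silently miscounts via Python's negative-index wraparound — a value of neither
-- program's specification.
def Pre_maximize_sum (array : List Int) : Prop :=
  array ≠ [] ∧ (∀ x ∈ array, 0 ≤ x) ∧ (∃ x ∈ array, 1 ≤ x)
instance (array : List Int) : Decidable (Pre_maximize_sum array) := by
  unfold Pre_maximize_sum; infer_instance

def pvWitness_maximize_sum : List Int := [2, 2, 3, 3, 3, 4]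

def Spec_maximize_sum (array : List Int) (out : Int) : Prop := out = maximize_sum_alt array
instance (array : List Int) (out : Int) : Decidable (Spec_maximize_sum array out) := by
  unfold Spec_maximize_sum; infer_instance

-- ===== CLAIM (what is proved, stated in full; the proofs are below) =====
def Claim_equal_maximize_sum : Prop :=
  ∀ (array : List Int), Dom_maximize_sum array → Pre_maximize_sum array →
    Spec_maximize_sum array (maximize_sum array)

-- ===== LEMMAS AND PROOFS =====

-- count of value j (as Int), the weight function of the DP
def pvCnt (a : List Int) (j : Nat) : Int := (a.count (j : Int) : Int)

-- the house-robber recurrence both programs compute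
def pvR (a : List Int) : Nat → Int
  | 0 => 0
  | 1 => pvCnt a 1 * 1
  | (k+2) => max (pvR a k + pvCnt a (k+2) * ((k+2 : Nat) : Int)) (pvR a (k+1))

-- pvR one step back (value of the DP just below p)
def pvRp (a : List Int) : Nat → Int
  | 0 => 0
  | (k+1) => pvR a k

-- B's loop body with the counter dict made explicit
def pvStep (a : List Int) (st : Int × Int × Option Int) (v : Int) : Int × Int × Option Int :=
  let take := st.1
  let skip := st.2.1
  let prev := st.2.2
  let best := if take > skip then take else skip
  if prev = some (v - 1) then (skip + v * (PySem.Dict.counter a).getD v 0, best, some v)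
  else (best + v * (PySem.Dict.counter a).getD v 0, best, some v)

theorem pv_if_gt_eq_max (a b : Int) : (if a > b then a else b) = max a b := by
  split_ifs <;> omega

theorem pvCnt_nonneg (a : List Int) (j : Nat) : 0 ≤ pvCnt a j := by
  simp [pvCnt]

theorem pvR_mono (a : List Int) (k : Nat) : pvR a k ≤ pvR a (k+1) := by
  match k with
  | 0 =>
    have h1 : (0:Int) ≤ pvCnt a 1 * 1 := by
      have := pvCnt_nonneg a 1; omega
    simpa [pvR] using h1
  | (k+1) => exact le_max_right _ _

theorem pvR_succ_eq (a : List Int) (k : Nat) (h : pvCnt a (k+1) = 0) :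
    pvR a (k+1) = pvR a k := by
  match k with
  | 0 => simp [pvR, h]
  | (k+1) =>
    have := pvR_mono a k
    simp [pvR, h]
    omega

theorem pvR_const (a : List Int) (p b : Nat) (hpb : p ≤ b)
    (h : ∀ j, p < j → j ≤ b → pvCnt a j = 0) : pvR a b = pvR a p := by
  induction b with
  | zero =>
    have hp0 : p = 0 := by omega
    rw [hp0]
  | succ b ih =>
    rcases Nat.lt_or_ge p (b+1) with hlt | hge
    · have hstep : pvR a (b+1) = pvR a b := pvR_succ_eq a b (h _ hlt le_rfl)
      rcases Nat.eq_or_lt_of_le (Nat.le_of_lt_succ hlt) with he | hlt2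
      · rw [hstep, he]
      · rw [hstep]; exact ih (by omega) (fun j h1 h2 => h j h1 (by omega))
    · have hpe : p = b + 1 := by omega
      rw [hpe]

theorem pvR_first (a : List Int) (k : Nat)
    (h : ∀ j, 1 ≤ j → j < k → pvCnt a j = 0) :
    pvR a k = max (pvCnt a k * (k : Int)) 0 := by
  match k with
  | 0 => simp [pvR, pvCnt]
  | 1 =>
    have := pvCnt_nonneg a 1
    simp [pvR]
    omega
  | (k+2) =>
    have h1 : pvR a k = pvR a 0 := pvR_const a 0 k (by omega) (fun j hj hjk => h j hj (by omega))
    have h2 : pvR a (k+1) = pvR a 0 := pvR_const a 0 (k+1) (by omega) (fun j hj hjk => h j hj (by omega))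
    simp [pvR] at *
    omega

theorem pv_foldl_set_getD (l : List Int) (f : List Int) (j : Nat) (hj : j < f.length)
    (hl : ∀ x ∈ l, 0 ≤ x ∧ x.toNat < f.length) :
    (l.foldl (fun f num => f.set num.toNat (f.getD num.toNat 0 + 1)) f).getD j 0
      = f.getD j 0 + (l.count (j : Int) : Int) := by
  induction l generalizing f with
  | nil => simp
  | cons x t ih =>
    obtain ⟨hx0, hxl⟩ := hl x (List.mem_cons_self)
    have hlen : (f.set x.toNat (f.getD x.toNat 0 + 1)).length = f.length := by
      simp
    rw [List.foldl_cons,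
        ih (f.set x.toNat (f.getD x.toNat 0 + 1)) (by omega)
           (fun y hy => by have := hl y (List.mem_cons_of_mem _ hy); omega)]
    by_cases hxe : x = (j : Int)
    · subst hxe
      simp only [Int.toNat_natCast]
      rw [List.count_cons_self, List.getD_eq_getElem?_getD,
          List.getElem?_set_self (by omega), List.getD_eq_getElem?_getD]
      simp only [Option.getD_some]
      push_cast
      ring
    · have hxn : x.toNat ≠ j := by omega
      rw [List.getD_eq_getElem?_getD, List.getD_eq_getElem?_getD,
          List.getElem?_set_ne hxn]
      rw [List.count_cons_of_ne (by exact hxe)]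
      simp

theorem pv_getD_map_range (g : Nat → Int) (i N : Nat) (h : i < N) :
    (((List.range N).map g).getD i 0) = g i := by
  rw [List.getD_eq_getElem?_getD, List.getElem?_map, List.getElem?_range h]
  rfl

theorem pv_getLastD_map_range (g : Nat → Int) (n : Nat) (h : 0 < n) :
    (((List.range n).map g).getLastD 0) = g (n - 1) := by
  obtain ⟨k, rfl⟩ : ∃ k, n = k + 1 := ⟨n - 1, by omega⟩
  rw [List.range_succ, List.map_append]
  simp

theorem pv_dp_fold (a : List Int) (freq : List Int) (n : Nat)
    (hf : ∀ j, j < n → freq.getD j 0 = pvCnt a j) :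
    ∀ k, 2 + k ≤ n →
    (List.range' 2 k).foldl
      (fun ms idx => ms ++ [max (ms.getD (idx - 2) 0 + freq.getD idx 0 * (idx : Int)) (ms.getD (idx - 1) 0)])
      ((List.range 2).map (pvR a)) = (List.range (2 + k)).map (pvR a) := by
  intro k
  induction k with
  | zero => intro _; rfl
  | succ k ih =>
    intro hk
    rw [List.range'_1_concat, List.foldl_append, ih (by omega), List.foldl_cons, List.foldl_nil]
    have hlen : ((List.range (2 + k)).map (pvR a)).length = 2 + k := by simp
    have h2 : 2 + k - 2 = k := by omega
    have h1 : 2 + k - 1 = k + 1 := by omega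
    rw [h2, h1, pv_getD_map_range _ _ _ (by omega), pv_getD_map_range _ _ _ (by omega),
        hf (2 + k) (by omega)]
    have hr : 2 + (k + 1) = (2 + k) + 1 := by omega
    rw [hr, List.range_succ, List.map_append]
    congr 1
    simp only [List.map_cons, List.map_nil, List.cons.injEq, and_true]
    show max (pvR a k + pvCnt a (2 + k) * ((2 + k : Nat) : Int)) (pvR a (k + 1)) = pvR a (2 + k)
    have he : 2 + k = k + 2 := by omega
    rw [he]
    rfl

theorem pv_A_eq (array : List Int) (m : Int)
    (hmax : PySem.List.max? array (fun x => x) = some m)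
    (hnn : ∀ x ∈ array, 0 ≤ x) (hm1 : 1 ≤ m) :
    maximize_sum array = pvR array m.toNat := by
  have hub : ∀ y ∈ array, y ≤ m := fun y hy => PySem.List.max?_isMax hmax y hy
  unfold maximize_sum
  rw [hmax]
  simp only []
  set freq := List.foldl (fun f num => f.set num.toNat (f.getD num.toNat 0 + 1))
      (List.replicate (m + 1).toNat (0 : Int)) array with hfreq
  have hget : ∀ j, j < (m + 1).toNat → freq.getD j 0 = pvCnt array j := by
    intro j hj
    rw [hfreq, pv_foldl_set_getD _ _ j (by simp; omega)
        (fun x hx => ⟨hnn x hx, by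
          have h1 := hub x hx
          have h2 := hnn x hx
          simp
          omega⟩)]
    simp [pvCnt]
  have hinit : [freq.getD 0 0 * 0, freq.getD 1 0 * 1] = (List.range 2).map (pvR array) := by
    rw [hget 1 (by omega)]
    simp [List.range_succ, pvR]
  rw [hinit, pv_dp_fold array freq ((m + 1).toNat) hget ((m + 1).toNat - 2) (by omega)]
  rw [show 2 + ((m + 1).toNat - 2) = (m + 1).toNat from by omega]
  rw [pv_getLastD_map_range _ _ (by omega)]
  congr 1
  omega

theorem pv_getLastD_mem (l : List Int) (d : Int) (h : l ≠ []) : l.getLastD d ∈ l := by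
  induction l generalizing d with
  | nil => exact absurd rfl h
  | cons a t ih =>
    rw [List.getLastD_cons]
    rcases t with _ | ⟨b, t'⟩
    · simp
    · exact List.mem_cons_of_mem _ (ih a (by simp))

theorem pv_getLastD_max (l : List Int) (d x : Int) (hp : l.Pairwise (· < ·)) (hx : x ∈ l) :
    x ≤ l.getLastD d := by
  induction l generalizing d with
  | nil => simp at hx
  | cons a t ih =>
    rw [List.getLastD_cons]
    rcases List.mem_cons.mp hx with rfl | hxt
    · rcases t with _ | ⟨b, t'⟩
      · simp
      · have hmem : (b :: t').getLastD x ∈ b :: t' := pv_getLastD_mem _ _ (by simp)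
        have hall : ∀ y ∈ b :: t', x < y := (List.pairwise_cons.mp hp).1
        exact le_of_lt (hall _ hmem)
    · exact ih a (List.pairwise_cons.mp hp).2 hxt

theorem pv_loop (a : List Int) :
    ∀ (vs : List Int) (p : Nat) (t s : Int),
      vs.Pairwise (· < ·) →
      (∀ v ∈ vs, (p : Int) < v) →
      (∀ j : Nat, p < j → ((j : Int) ∉ vs) → pvCnt a j = 0) →
      max t s = pvR a p →
      s = pvRp a p →
      max (vs.foldl (pvStep a) (t, s, some (p : Int))).1
          (vs.foldl (pvStep a) (t, s, some (p : Int))).2.1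
        = pvR a ((vs.getLastD (p : Int)).toNat) := by
  intro vs
  induction vs with
  | nil =>
    intro p t s _ _ _ hmx hs
    simpa using hmx
  | cons v rest ih =>
    intro p t s hpw hgt hout hmx hs
    have hvp : (p : Int) < v := hgt v List.mem_cons_self
    have hv0 : (0 : Int) ≤ v := le_trans (by positivity) (le_of_lt hvp)
    have hvu : ((v.toNat : Nat) : Int) = v := Int.toNat_of_nonneg hv0
    have hpu : p < v.toNat := by omega
    have hrest_gt : ∀ x ∈ rest, v < x := (List.pairwise_cons.mp hpw).1
    have hrest_pw : rest.Pairwise (· < ·) := (List.pairwise_cons.mp hpw).2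
    have hcnt : (PySem.Dict.counter a).getD v 0 = pvCnt a v.toNat := by
      rw [PySem.Dict.getD_counter, pvCnt, hvu]
    have hout' : ∀ j : Nat, v.toNat < j → ((j : Int) ∉ rest) → pvCnt a j = 0 := by
      intro j hj hnot
      apply hout j (by omega)
      intro hmem
      rcases List.mem_cons.mp hmem with he | hin
      · omega
      · exact hnot hin
    have hgt' : ∀ x ∈ rest, ((v.toNat : Nat) : Int) < x := by
      intro x hx; rw [hvu]; exact hrest_gt x hx
    rw [List.foldl_cons, List.getLastD_cons]
    by_cases hadj : (p : Int) = v - 1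
    · -- adjacent value: take = skip + points
      have hup : v.toNat = p + 1 := by omega
      have hstep : pvStep a (t, s, some (p : Int)) v
          = (s + v * (PySem.Dict.counter a).getD v 0, max t s, some ((v.toNat : Nat) : Int)) := by
        simp [pvStep, hadj, pv_if_gt_eq_max, hvu]
      have hmx' : max (s + v * (PySem.Dict.counter a).getD v 0) (max t s) = pvR a v.toNat := by
        rw [hcnt, hup]
        match p, hmx, hs, hup with
        | 0, hmx, hs, hup =>
          have hv1 : v = 1 := by omega
          have hc := pvCnt_nonneg a 1
          simp [pvRp] at hs
          simp [pvR] at hmx ⊢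
          rw [hs, hv1]
          omega
        | (q+1), hmx, hs, hup =>
          have hvq : v = ((q + 1 + 1 + 1 : Nat) : Int) - 1 := by omega
          simp [pvRp] at hs
          show max (s + v * pvCnt a (q + 2)) (max t s) = pvR a (q + 2)
          rw [hmx, hs]
          show _ = max (pvR a q + pvCnt a (q+2) * ((q+2 : Nat) : Int)) (pvR a (q+1))
          have hvc : v = ((q + 2 : Nat) : Int) := by push_cast at hvq ⊢; omega
          rw [hvc, mul_comm]
      have hs' : max t s = pvRp a v.toNat := by
        rw [hup, hmx]
        rfl
      have := ih v.toNat (s + v * (PySem.Dict.counter a).getD v 0) (max t s)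
        hrest_pw hgt' hout' hmx' hs'
      rw [hstep, this, hvu]
    · -- gap: take = best + points, DP constant across the gap
      have hup2 : p + 2 ≤ v.toNat := by omega
      have hstep : pvStep a (t, s, some (p : Int)) v
          = (max t s + v * (PySem.Dict.counter a).getD v 0, max t s, some ((v.toNat : Nat) : Int)) := by
        simp [pvStep, hadj, pv_if_gt_eq_max, hvu]
      have hconst : ∀ j : Nat, p < j → j < v.toNat → pvCnt a j = 0 := by
        intro j h1 h2
        apply hout j h1
        intro hmem
        rcases List.mem_cons.mp hmem with he | hin
        · omega
        · have := hrest_gt _ hin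
          omega
      have hR1 : pvR a (v.toNat - 1) = pvR a p :=
        pvR_const a p (v.toNat - 1) (by omega) (fun j h1 h2 => hconst j h1 (by omega))
      have hR2 : pvR a (v.toNat - 2) = pvR a p :=
        pvR_const a p (v.toNat - 2) (by omega) (fun j h1 h2 => hconst j h1 (by omega))
      have hmx' : max (max t s + v * (PySem.Dict.counter a).getD v 0) (max t s) = pvR a v.toNat := by
        rw [hcnt, hmx]
        have hsplit : v.toNat = (v.toNat - 2) + 2 := by omega
        rw [hsplit]
        show max (pvR a p + v * pvCnt a ((v.toNat - 2) + 2)) (pvR a p)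
            = max (pvR a (v.toNat - 2) + pvCnt a ((v.toNat - 2) + 2) * (((v.toNat - 2) + 2 : Nat) : Int))
                (pvR a ((v.toNat - 2) + 1))
        have hvc : (((v.toNat - 2) + 2 : Nat) : Int) = v := by push_cast; omega
        have hstep1 : (v.toNat - 2) + 1 = v.toNat - 1 := by omega
        rw [hvc, hR2, hstep1, hR1, mul_comm]
      have hs' : max t s = pvRp a v.toNat := by
        have hsplit : v.toNat = (v.toNat - 1) + 1 := by omega
        rw [hsplit, hmx]
        show pvR a p = pvR a (v.toNat - 1)
        rw [hR1]
      have := ih v.toNat (max t s + v * (PySem.Dict.counter a).getD v 0) (max t s)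
        hrest_pw hgt' hout' hmx' hs'
      rw [hstep, this, hvu]

theorem pv_alt_eq (array : List Int) :
    maximize_sum_alt array =
      (let r := (PySem.List.sorted (PySem.Set.ofList array) (fun v => v) false).foldl
          (pvStep array) (0, 0, none)
       if r.1 > r.2.1 then r.1 else r.2.1) := by
  unfold maximize_sum_alt pvStep
  rw [PySem.Dict.foldl_insert_getD_add_one_eq_counter]
  simp only [PySem.Dict.keys_counter]


-- ===== VERDICT (by name: the statement is the Claim_ definition above) =====
theorem maximize_sum_spec : Claim_equal_maximize_sum := by
  intro array hdom hpre
  unfold Spec_maximize_sum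
  obtain ⟨hne, hnn, x, hx, hx1⟩ := hpre
  obtain ⟨m, hmax⟩ : ∃ m, PySem.List.max? array (fun x => x) = some m := by
    cases hm : PySem.List.max? array (fun x => x) with
    | none => exact absurd ((PySem.List.max?_eq_none_iff array _).mp hm) hne
    | some m => exact ⟨m, rfl⟩
  have hub : ∀ y ∈ array, y ≤ m := fun y hy => PySem.List.max?_isMax hmax y hy
  have hmem_m : m ∈ array := PySem.List.max?_mem hmax
  have hm1 : 1 ≤ m := le_trans hx1 (hub x hx)
  rw [pv_A_eq array m hmax hnn hm1, pv_alt_eq]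
  simp only []
  set vs := PySem.List.sorted (PySem.Set.ofList array) (fun v => v) false with hvs
  have hpw : vs.Pairwise (· < ·) := by
    rw [hvs]
    exact PySem.List.sorted_ofList_pairwise_lt array
  have hmemvs : ∀ y : Int, y ∈ vs ↔ y ∈ array := by
    intro y
    rw [hvs, PySem.List.mem_sorted]
    exact PySem.Set.mem_ofList array y
  obtain ⟨v0, rest, hcons⟩ : ∃ v0 rest, vs = v0 :: rest := by
    cases hv : vs with
    | nil =>
      have hmm : m ∈ vs := (hmemvs m).mpr hmem_m
      rw [hv] at hmm
      simp at hmm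
    | cons a b => exact ⟨a, b, rfl⟩
  have hv0mem : v0 ∈ array := (hmemvs v0).mp (hcons ▸ List.mem_cons_self)
  have hv00 : (0 : Int) ≤ v0 := hnn _ hv0mem
  have hv0u : ((v0.toNat : Nat) : Int) = v0 := Int.toNat_of_nonneg hv00
  have hmin : ∀ y ∈ array, v0 ≤ y := by
    intro y hy
    exact PySem.List.key_head_sorted_le _ _ (hvs.symm.trans hcons) y ((PySem.Set.mem_ofList array y).mpr hy)
  have hstep0 : pvStep array (0, 0, none) v0
      = (v0 * (PySem.Dict.counter array).getD v0 0, 0, some ((v0.toNat : Nat) : Int)) := by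
    simp [pvStep, hv0u]
  have hcnt0 : (PySem.Dict.counter array).getD v0 0 = pvCnt array v0.toNat := by
    rw [PySem.Dict.getD_counter, pvCnt, hv0u]
  have hlow : ∀ j : Nat, 1 ≤ j → j < v0.toNat → pvCnt array j = 0 := by
    intro j h1 h2
    have hnm : (j : Int) ∉ array := by
      intro hmem
      have := hmin _ hmem
      omega
    simp [pvCnt, List.count_eq_zero.mpr hnm]
  have hmx0 : max (v0 * (PySem.Dict.counter array).getD v0 0) 0 = pvR array v0.toNat := by
    rw [hcnt0, pvR_first array v0.toNat hlow, hv0u, mul_comm]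
  have hs0 : (0 : Int) = pvRp array v0.toNat := by
    cases hn : v0.toNat with
    | zero => rfl
    | succ q =>
      show (0 : Int) = pvR array q
      rw [pvR_const array 0 q (by omega) (fun j h1 h2 => hlow j (by omega) (by omega))]
      rfl
  have hout0 : ∀ j : Nat, v0.toNat < j → ((j : Int) ∉ rest) → pvCnt array j = 0 := by
    intro j hj hnot
    have hnm : (j : Int) ∉ array := by
      intro hmem
      have hin : (j : Int) ∈ vs := (hmemvs _).mpr hmem
      rw [hcons] at hin
      rcases List.mem_cons.mp hin with he | hin2
      · omega
      · exact hnot hin2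
    simp [pvCnt, List.count_eq_zero.mpr hnm]
  have hloop := pv_loop array rest v0.toNat
    (v0 * (PySem.Dict.counter array).getD v0 0) 0
    (List.pairwise_cons.mp (hcons ▸ hpw)).2
    (fun y hy => by
      rw [hv0u]
      exact (List.pairwise_cons.mp (hcons ▸ hpw)).1 y hy)
    hout0 hmx0 hs0
  have hlastm : rest.getLastD ((v0.toNat : Nat) : Int) = m := by
    rw [hv0u]
    have hLmem : (v0 :: rest).getLastD 0 ∈ v0 :: rest := pv_getLastD_mem _ _ (by simp)
    have hL1 : (v0 :: rest).getLastD 0 = rest.getLastD v0 := List.getLastD_cons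
    have hle : (v0 :: rest).getLastD 0 ≤ m := by
      have : (v0 :: rest).getLastD 0 ∈ array := (hmemvs _).mp (hcons ▸ hLmem)
      exact hub _ this
    have hge : m ≤ (v0 :: rest).getLastD 0 :=
      pv_getLastD_max _ 0 m (hcons ▸ hpw) (hcons ▸ (hmemvs m).mpr hmem_m)
    rw [hL1] at hle hge
    omega
  rw [hcons, List.foldl_cons, hstep0, pv_if_gt_eq_max, hloop, hlastm]
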